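-- pv_equiv track=rewrite | github.com/GenuinelyAref/Spelling-Bee-Solver | Spelling Bee/spelling_bee_v3.py | strip_invalid
-- ===== SOURCE A (Python) =====
-- def strip_invalid(lst):
--     # initialise variables
--     count = 1
--     some_list = []
--     # create a list of how often each letter occurs consecutively, very similar to run length encoding but with seven
--     # possible characters instead of 0's and 1's. The actual characters are dismissible, the consecutive
--     if len(lst) > 1:
--         for x in range(1, len(lst)):
--             if lst[x - 1] == lst[x]:
--                 count += 1
--             else:
--                 some_list.append(count)
--                 count = 1
--         some_list.append(count)
--     # remove occurrences of 1/2 consecutive letters, if anything remains then there are instances of 3+ consecutive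
--     # letters, which would return True
--     some_list = list(filter(lambda var_one: var_one != 1, some_list))
--     some_list = list(filter(lambda var_two: var_two != 2, some_list))
--     if len(some_list) > 0:
--         return True
--     # after checking for this condition, check for secondary condition to further eliminate more invalid options
--     else:
--         # if must-have letter is present at least once, then the string can be a valid word
--         if lst.count(0) != 0:
--             return False
--         # otherwise, it can't be a valid word
--         else:
--             return True
-- ===== SOURCE B (Python) =====
-- def strip_invalid(lst):
--     has_triple = any(a == b == c for a, b, c in zip(lst, lst[1:], lst[2:]))
--     return has_triple or 0 not in lst
-- ===== Notes on version B (the rewrite author's own statement) =====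
-- stated objective: simpler
-- what changed: Replaced the run-length-encoding pass plus two filter passes and a count with a single sliding-window triple scan and a membership test.
import Mathlib
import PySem

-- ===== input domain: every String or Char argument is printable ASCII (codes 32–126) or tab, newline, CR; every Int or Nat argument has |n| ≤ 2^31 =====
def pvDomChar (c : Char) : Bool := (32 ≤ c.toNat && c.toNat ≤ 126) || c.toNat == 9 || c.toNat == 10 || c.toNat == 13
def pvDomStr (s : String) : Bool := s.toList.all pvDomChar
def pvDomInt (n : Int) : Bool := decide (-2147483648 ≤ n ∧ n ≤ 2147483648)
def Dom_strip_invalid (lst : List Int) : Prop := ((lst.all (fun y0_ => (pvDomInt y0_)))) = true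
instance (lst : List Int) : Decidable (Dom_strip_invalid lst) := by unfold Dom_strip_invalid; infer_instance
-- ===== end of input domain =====

-- B replaces A's run-length-encoding pass + two filter passes + count test with one
-- sliding-window triple scan plus a membership test (objective: simpler).

-- ===== PORT A =====
-- A's 'for x in range(1, len(lst))' loop carried as state (count, some_list),
-- walking the adjacent pairs (lst[x-1], lst[x]); the final 'append(count)' is the base case
def pvAloop (prev count : Int) (acc : List Int) : List Int → List Int
  | [] => acc ++ [count]
  | x :: rest =>
      if prev == x then pvAloop x (count + 1) acc rest
      else pvAloop x 1 (acc ++ [count]) rest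

def strip_invalid (lst : List Int) : Bool :=
  let some_list : List Int :=
    if lst.length > 1 then
      match lst with
      | [] => []            -- unreachable under length > 1
      | h :: t => pvAloop h 1 [] t
    else []
  let some_list := some_list.filter (fun v => v != 1)
  let some_list := some_list.filter (fun v => v != 2)
  if some_list.length > 0 then true
  else if PySem.List.count lst 0 ≠ 0 then false
  else true

-- ===== PORT B =====
-- zip(lst, lst[1:], lst[2:]) windowed scan, then '0 not in lst'
def strip_invalid_alt (lst : List Int) : Bool :=
  let has_triple := (lst.zip (lst.tail.zip lst.tail.tail)).any
      (fun p => p.1 == p.2.1 && p.2.1 == p.2.2)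
  has_triple || !(lst.contains 0)

-- ===== PRECONDITION & SPEC =====
def Spec_strip_invalid (lst : List Int) (out : Bool) : Prop := out = strip_invalid_alt lst
instance (lst : List Int) (out : Bool) : Decidable (Spec_strip_invalid lst out) := by unfold Spec_strip_invalid; infer_instance

-- ===== CLAIM (what is proved, stated in full; the proofs are below) =====
def Claim_equal_strip_invalid : Prop := ∀ (lst : List Int), Dom_strip_invalid lst → Spec_strip_invalid lst (strip_invalid lst)

-- ===== LEMMAS AND PROOFS =====

-- B's sliding-window triple test, as a standalone function for the proofs
def pvTriple (l : List Int) : Bool :=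
  (l.zip (l.tail.zip l.tail.tail)).any (fun p => p.1 == p.2.1 && p.2.1 == p.2.2)

-- A's double filter, abbreviated
def pvFilt (l : List Int) : List Int :=
  (l.filter (fun v => v != 1)).filter (fun v => v != 2)

-- does the live run (prev repeated count times) extended by rest contain a run of length ≥ 3?
def pvRunHit (prev count : Int) : List Int → Bool
  | [] => decide (3 ≤ count)
  | x :: rest =>
      if prev == x then pvRunHit x (count + 1) rest
      else (decide (3 ≤ count)) || pvRunHit x 1 rest

theorem pvRunHit_ge3 (rest : List Int) : ∀ prev count, 3 ≤ count → pvRunHit prev count rest = true := by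
  induction rest with
  | nil => intro prev count h; simp [pvRunHit, h]
  | cons x r ih =>
      intro prev count h
      simp only [pvRunHit]
      split
      · exact ih x (count + 1) (by omega)
      · simp [h]

theorem pvFilt_append (a b : List Int) : pvFilt (a ++ b) = pvFilt a ++ pvFilt b := by
  simp [pvFilt, List.filter_append]

theorem pvFilt_app_single (acc : List Int) (c : Int) (h1 : 1 ≤ c) :
    (pvFilt acc ++ pvFilt [c] ≠ []) ↔ (pvFilt acc ≠ [] ∨ 3 ≤ c) := by
  have hsing : (pvFilt [c] ≠ []) ↔ 3 ≤ c := by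
    have hc : c = 1 ∨ c = 2 ∨ 3 ≤ c := by omega
    rcases hc with h | h | h <;> simp [pvFilt, h] <;> omega
  constructor
  · intro h
    by_cases ha : pvFilt acc = []
    · exact Or.inr (hsing.mp (fun hs => h (by rw [ha, hs]; rfl)))
    · exact Or.inl ha
  · rintro (h | h) hc
    · exact h (List.append_eq_nil_iff.mp hc).1
    · exact (hsing.mpr h) (List.append_eq_nil_iff.mp hc).2

-- the filtered RLE list is nonempty iff a finished count escaped the filters or the live run hits 3
theorem pvAloop_filt (rest : List Int) :
    ∀ prev count acc, 1 ≤ count →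
      ((pvFilt (pvAloop prev count acc rest) ≠ []) ↔
        (pvFilt acc ≠ [] ∨ pvRunHit prev count rest = true)) := by
  induction rest with
  | nil =>
      intro prev count acc h1
      simp only [pvAloop, pvRunHit, pvFilt_append]
      rw [pvFilt_app_single acc count h1]
      simp
  | cons x r ih =>
      intro prev count acc h1
      by_cases hpx : (prev == x) = true
      · simp only [pvAloop, pvRunHit, hpx, if_true]
        exact ih x (count + 1) acc (by omega)
      · simp only [pvAloop, pvRunHit, hpx, if_false, Bool.false_eq_true]
        rw [ih x 1 (acc ++ [count]) (by norm_num), pvFilt_append,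
            pvFilt_app_single acc count h1]
        simp [or_assoc]

theorem pvTriple_cons3 (a b c : Int) (r : List Int) :
    pvTriple (a :: b :: c :: r) = ((a == b && b == c) || pvTriple (b :: c :: r)) := rfl

theorem pvTriple_skip (prev x : Int) (r : List Int) (h : (prev == x) = false) :
    pvTriple (prev :: x :: r) = pvTriple (x :: r) := by
  cases r with
  | nil => rfl
  | cons c r' => simp [pvTriple_cons3, h]

theorem pvRunHit_one_two (rest : List Int) : ∀ prev : Int,
    pvRunHit prev 1 rest = pvTriple (prev :: rest) ∧
    pvRunHit prev 2 rest = pvTriple (prev :: prev :: rest) := by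
  induction rest with
  | nil =>
      intro prev
      constructor <;> rfl
  | cons x r ih =>
      intro prev
      constructor
      · by_cases hpx : (prev == x) = true
        · have he : prev = x := by simpa using hpx
          simp only [pvRunHit, hpx, if_true]
          rw [show (1:Int) + 1 = 2 from rfl, (ih x).2, he]
        · simp only [pvRunHit, hpx, if_false, Bool.false_eq_true]
          rw [pvTriple_skip prev x r (by simpa using hpx), (ih x).1]
          rfl
      · by_cases hpx : (prev == x) = true
        · have he : prev = x := by simpa using hpx
          simp only [pvRunHit, hpx, if_true]
          rw [show (2:Int) + 1 = 3 from rfl, pvRunHit_ge3 r x 3 (by norm_num), he, pvTriple_cons3]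
          simp
        · have hpx' : (prev == x) = false := by simpa using hpx
          simp only [pvRunHit, hpx, if_false, Bool.false_eq_true]
          rw [pvTriple_cons3, pvTriple_skip prev x r hpx', (ih x).1]
          simp [hpx']

-- ===== VERDICT (by name: the statement is the Claim_ definition above) =====
theorem strip_invalid_spec : Claim_equal_strip_invalid := by
  intro lst _
  unfold Spec_strip_invalid
  match lst with
  | [] => rfl
  | [x] =>
      by_cases hx : x = 0 <;>
        simp [strip_invalid, strip_invalid_alt, PySem.List.count_eq, hx, eq_comm]
  | h :: y :: t =>
      have hA : strip_invalid (h :: y :: t) =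
          (if (pvFilt (pvAloop h 1 [] (y :: t))).length > 0 then true
           else if PySem.List.count (h :: y :: t) 0 ≠ 0 then false else true) := by
        simp [strip_invalid, pvFilt]
      have hB : strip_invalid_alt (h :: y :: t) =
          (pvTriple (h :: y :: t) || !((h :: y :: t).contains 0)) := rfl
      rw [hA, hB]
      have htrip : pvTriple (h :: y :: t) = pvRunHit h 1 (y :: t) :=
        ((pvRunHit_one_two (y :: t) h).1).symm
      have hfilt := pvAloop_filt (y :: t) h 1 [] (by norm_num)
      by_cases htr : pvRunHit h 1 (y :: t) = true
      · have hne : pvFilt (pvAloop h 1 [] (y :: t)) ≠ [] := hfilt.mpr (Or.inr htr)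
        have hlen : (pvFilt (pvAloop h 1 [] (y :: t))).length > 0 :=
          List.length_pos_iff.mpr hne
        simp [hlen, htrip, htr]
      · have hfalse : pvRunHit h 1 (y :: t) = false := by
          revert htr; cases pvRunHit h 1 (y :: t) <;> simp
        have hnil : pvFilt (pvAloop h 1 [] (y :: t)) = [] := by
          by_contra hne
          rcases hfilt.mp hne with h' | h'
          · exact h' rfl
          · exact htr h'
        have hlen0 : ¬ (pvFilt (pvAloop h 1 [] (y :: t))).length > 0 := by
          rw [hnil]; simp
        rw [if_neg hlen0, htrip, hfalse, Bool.false_or, PySem.List.count_eq]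
        by_cases hc : (0 : Int) ∈ (h :: y :: t) <;> simp [hc, List.count_eq_zero]
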